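-- pv_equiv track=rewrite | github.com/mridulrao/self_learning_agent | derive_workflow.py | _dedupe_chain
-- ===== SOURCE A (Python) =====
-- from typing import Any, Dict, List, Optional, Tuple
--
-- def is_blank(url: str) -> bool:
--     u = (url or "").strip().lower()
--     return u in ("", "about:blank")
--
-- def _dedupe_chain(urls: List[str]) -> List[str]:
--     out: List[str] = []
--     for u in urls:
--         if is_blank(u):
--             continue
--         if not out or out[-1] != u:
--             out.append(u)
--     return out
-- ===== SOURCE B (Python) =====
-- from typing import List, Optional
--
-- def is_blank(url: str) -> bool:
--     u = (url or "").strip().lower()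
--     return u in ("", "about:blank")
--
-- def _dedupe_chain(urls: List[str]) -> List[str]:
--     # Stateless per-element decision: keep urls[i] iff it is non-blank and differs
--     # from the nearest non-blank element before it (no accumulator is consulted).
--     def prev_nonblank(i: int) -> Optional[str]:
--         for j in range(i - 1, -1, -1):
--             if not is_blank(urls[j]):
--                 return urls[j]
--         return None
--     return [u for i, u in enumerate(urls)
--             if not is_blank(u) and prev_nonblank(i) != u]
-- ===== Notes on version B (the rewrite author's own statement) =====
-- stated objective: alternative
-- what changed: A threads an output accumulator through one loop and compares against out[-1]; B makes a stateless per-index decision - a comprehension keeps urls[i] iff it is non-blank and differs from the nearest preceding non-blank element, found by a backward scan helper - so no output state is maintained at all.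
import Mathlib
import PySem

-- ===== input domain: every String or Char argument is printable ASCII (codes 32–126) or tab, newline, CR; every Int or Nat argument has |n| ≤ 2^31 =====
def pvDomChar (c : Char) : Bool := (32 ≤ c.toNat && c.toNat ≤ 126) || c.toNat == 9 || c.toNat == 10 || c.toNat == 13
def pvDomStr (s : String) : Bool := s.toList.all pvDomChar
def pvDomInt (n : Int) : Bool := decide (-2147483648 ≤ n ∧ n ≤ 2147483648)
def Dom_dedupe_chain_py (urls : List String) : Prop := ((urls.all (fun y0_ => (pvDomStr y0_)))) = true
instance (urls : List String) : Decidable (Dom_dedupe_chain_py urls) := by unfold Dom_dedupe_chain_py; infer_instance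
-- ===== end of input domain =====

-- B: stateless per-index rewrite — keep urls[i] iff non-blank and differing from the nearest preceding non-blank element (backward-scan helper), instead of A's accumulator loop comparing with out[-1].


-- ===== PORT A =====
-- is_blank: (url or "").strip().lower() in ("", "about:blank"); 'url or ""' is the identity on strings ("" is falsy, stays "")
def is_blank_py (url : String) : Bool :=
  let u := PySem.Str.lower (PySem.Str.strip url)
  u == "" || u == "about:blank"

def dedupe_chain_py (urls : List String) : List String :=
  urls.foldl (fun out u =>
    if is_blank_py u then out
    else if out.isEmpty || out.getLast? != some u then out ++ [u]
    else out) []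

-- ===== PORT B =====
-- prev_nonblank(i): the j-loop from i-1 down to 0 returns the first non-blank urls[j],
-- i.e. the first non-blank element of the reversed prefix urls[:i] (exact)
def pvPrevNonblank (urls : List String) (i : Int) : Option String :=
  ((urls.take i.toNat).reverse).find? (fun v => !is_blank_py v)

-- [u for i, u in enumerate(urls) if not is_blank(u) and prev_nonblank(i) != u]
def dedupe_chain_py_alt (urls : List String) : List String :=
  ((PySem.List.enumerate urls).filter
    (fun p => !is_blank_py p.2 && (pvPrevNonblank urls p.1 != some p.2))).map Prod.snd

-- ===== PRECONDITION & SPEC =====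
def Spec_dedupe_chain_py (urls : List String) (out : List String) : Prop := out = dedupe_chain_py_alt urls
instance (urls : List String) (out : List String) : Decidable (Spec_dedupe_chain_py urls out) := by unfold Spec_dedupe_chain_py; infer_instance

-- ===== CLAIM (what is proved, stated in full; the proofs are below) =====
def Claim_equal_dedupe_chain_py : Prop := ∀ (urls : List String), Dom_dedupe_chain_py urls → Spec_dedupe_chain_py urls (dedupe_chain_py urls)

-- ===== LEMMAS AND PROOFS =====

-- the body of A's fold
def pvStepA (out : List String) (u : String) : List String :=
  if is_blank_py u then out
  else if out.isEmpty || out.getLast? != some u then out ++ [u]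
  else out

-- intermediate recursive spec: result relative to the last non-blank element already seen
def pvG (last : Option String) : List String → List String
  | [] => []
  | u :: t =>
    if is_blank_py u then pvG last t
    else if last == some u then pvG last t
    else u :: pvG (some u) t

-- the last non-blank element, as a left fold seeded with 'last'
def pvLastNB (last : Option String) (l : List String) : Option String :=
  l.foldl (fun acc x => if !is_blank_py x then some x else acc) last

theorem pvLastNB_eq_find (l : List String) : ∀ last,
    pvLastNB last l = match l.reverse.find? (fun v => !is_blank_py v) with
      | some v => some v
      | none => last := by
  induction l with
  | nil => intro last; rfl
  | cons x t ih =>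
    intro last
    have hstep : pvLastNB last (x :: t) = pvLastNB (if !is_blank_py x then some x else last) t := by
      simp [pvLastNB]
    rw [hstep, ih, List.reverse_cons, List.find?_append]
    cases h : t.reverse.find? (fun v => !is_blank_py v) with
    | some v => simp
    | none =>
      by_cases hb : is_blank_py x
      · simp [hb]
      · simp [hb]

theorem pvLastNB_append (pre : List String) (u : String) :
    pvLastNB none (pre ++ [u]) = if !is_blank_py u then some u else pvLastNB none pre := by
  simp [pvLastNB, List.foldl_append]

theorem pvFoldA_eq_g (l : List String) : ∀ (out : List String),
    l.foldl pvStepA out = out ++ pvG out.getLast? l := by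
  induction l with
  | nil => intro out; simp [pvG]
  | cons u t ih =>
    intro out
    simp only [List.foldl_cons]
    rw [show pvG out.getLast? (u :: t) = if is_blank_py u = true then pvG out.getLast? t else if out.getLast? == some u then pvG out.getLast? t else u :: pvG (some u) t from rfl]
    by_cases hb : is_blank_py u
    · rw [show pvStepA out u = out by simp [pvStepA, hb], if_pos hb]
      exact ih out
    · rw [show pvStepA out u = if out.isEmpty || out.getLast? != some u then out ++ [u] else out by simp [pvStepA, hb]]
      rw [show (if is_blank_py u = true then pvG out.getLast? t
            else if out.getLast? == some u then pvG out.getLast? t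
            else u :: pvG (some u) t)
          = if out.getLast? == some u then pvG out.getLast? t else u :: pvG (some u) t by simp [hb]]
      by_cases hc : (out.isEmpty || out.getLast? != some u) = true
      · have hlast : (out.getLast? == some u) = false := by
          rcases Bool.or_eq_true_iff.mp hc with h | h
          · have : out = [] := by simpa [List.isEmpty_iff] using h
            subst this; rfl
          · simpa [bne] using h
        rw [if_pos hc, if_neg (by simp [hlast]), ih (out ++ [u])]
        simp [List.getLast?_append]
      · have hlast : (out.getLast? == some u) = true := by
          simp only [Bool.or_eq_true_iff, not_or] at hc
          simpa [bne] using hc.2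
        rw [if_neg hc, if_pos hlast, ih out]

-- core: pvG seeded with the last non-blank of a processed prefix equals B's
-- per-index filter over the remaining suffix
theorem pvG_eq_filter (t : List String) : ∀ (pre : List String),
    pvG (pvLastNB none pre) t =
      ((PySem.List.enumerate t (pre.length : Int)).filter
        (fun p => !is_blank_py p.2 &&
          (pvLastNB none ((pre ++ t).take p.1.toNat) != some p.2))).map Prod.snd := by
  induction t with
  | nil => intro pre; simp [pvG, PySem.List.enumerate_nil]
  | cons u t ih =>
    intro pre
    rw [PySem.List.enumerate_cons, List.filter_cons]
    have htake : ((pre ++ u :: t).take (pre.length : Int).toNat) = pre := by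
      simp
    have hpred : ∀ p : Int × String,
        (!is_blank_py p.2 && (pvLastNB none ((pre ++ u :: t).take p.1.toNat) != some p.2))
        = (!is_blank_py p.2 && (pvLastNB none (((pre ++ [u]) ++ t).take p.1.toNat) != some p.2)) := by
      intro p; simp [List.append_assoc]
    have hlen : ((pre ++ [u]).length : Int) = (pre.length : Int) + 1 := by simp
    have hih := ih (pre ++ [u])
    rw [hlen] at hih
    by_cases hb : is_blank_py u
    · have hnb : pvLastNB none (pre ++ [u]) = pvLastNB none pre := by
        rw [pvLastNB_append]; simp [hb]
      rw [show pvG (pvLastNB none pre) (u :: t) = pvG (pvLastNB none pre) t from by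
        simp [pvG, hb]]
      rw [if_neg (by simp [hb])]
      rw [List.filter_congr (fun p _ => hpred p), ← hih, hnb]
    · have hnb : pvLastNB none (pre ++ [u]) = some u := by
        rw [pvLastNB_append]; simp [hb]
      by_cases he : pvLastNB none pre = some u
      · rw [show pvG (pvLastNB none pre) (u :: t) = pvG (pvLastNB none pre) t from by
          simp [pvG, hb, he]]
        rw [if_neg (by simp [he])]
        rw [List.filter_congr (fun p _ => hpred p), ← hih, hnb, he]
      · rw [show pvG (pvLastNB none pre) (u :: t)
              = if is_blank_py u then pvG (pvLastNB none pre) t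
                else if (pvLastNB none pre) == some u then pvG (pvLastNB none pre) t
                else u :: pvG (some u) t from rfl,
            if_neg (by simp [hb]), if_neg (by simp [he])]
        rw [if_pos (by rw [htake]; simpa [hb] using he)]
        rw [List.map_cons]
        rw [List.filter_congr (fun p _ => hpred p), ← hih, hnb]

theorem dedupe_eq (urls : List String) : dedupe_chain_py urls = dedupe_chain_py_alt urls := by
  have h1 : dedupe_chain_py urls = List.foldl pvStepA [] urls := rfl
  rw [h1, pvFoldA_eq_g,
      show (([] : List String) ++ pvG ([] : List String).getLast? urls) = pvG none urls from rfl]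
  have h2 := pvG_eq_filter urls []
  simp only [List.nil_append, List.length_nil, Nat.cast_zero] at h2
  rw [show pvLastNB none [] = none from rfl] at h2
  rw [h2]
  unfold dedupe_chain_py_alt
  have hpr : ∀ p : Int × String,
      (!is_blank_py p.2 && (pvLastNB none (urls.take p.1.toNat) != some p.2))
      = (!is_blank_py p.2 && (pvPrevNonblank urls p.1 != some p.2)) := by
    intro p
    rw [pvPrevNonblank, pvLastNB_eq_find]
    cases h : ((urls.take p.1.toNat).reverse).find? (fun v => !is_blank_py v) <;> simp
  rw [List.filter_congr (fun p _ => hpr p)]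

-- ===== VERDICT (by name: the statement is the Claim_ definition above) =====
theorem dedupe_chain_py_spec : Claim_equal_dedupe_chain_py := by
  intro urls _
  exact dedupe_eq urls
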